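-- pv_equiv track=rewrite | github.com/KNI-PM-Szczecin/plan_pm | backend/PlanScrapper/parser.py | parseTeachers
-- ===== SOURCE A (Python) =====
-- def parseTeachers(teacher):
--     if teacher == "":
--         return []
--     prof = teacher.find("prof. ", 1)
--     dr = teacher.find("dr ", 7)
--     mgr = teacher.find("mgr ", 1)
--
--
--     teachers = []
--
--     if prof != -1:
--         teachers += parseTeachers(teacher[prof:])
--         teacher = teacher[:prof]
--     elif dr != -1:
--         teachers += (parseTeachers(teacher[dr:]))
--         teacher = teacher[:dr]
--     elif mgr != -1:
--         teachers += (parseTeachers(teacher[mgr:]))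
--         teacher = teacher[:mgr]
--
--     teachers.append(teacher)
--
--     return teachers
-- ===== SOURCE B (Python) =====
-- def parseTeachers(teacher):
--     if teacher == "":
--         return []
--     n = len(teacher)
--     # precompute every occurrence position of each title once (single scan per title)
--     profs = [i for i in range(n) if teacher.startswith("prof. ", i)]
--     drs = [i for i in range(n) if teacher.startswith("dr ", i)]
--     mgrs = [i for i in range(n) if teacher.startswith("mgr ", i)]
--
--     def nxt(lst, lo):
--         for i in lst:
--             if i >= lo:
--                 return i
--         return None
--
--     segments = []
--     p = 0
--     while True:
--         s = nxt(profs, p + 1)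
--         if s is None:
--             s = nxt(drs, p + 7)
--         if s is None:
--             s = nxt(mgrs, p + 1)
--         if s is None:
--             segments.append(teacher[p:])
--             break
--         segments.append(teacher[p:s])
--         p = s
--     segments.reverse()
--     return segments
-- ===== Notes on version B (the rewrite author's own statement) =====
-- stated objective: alternative
-- what changed: Replaces A's suffix-first recursion with repeated find calls by precomputing all occurrence positions of each title in one scan per title, then walking a pointer left-to-right through those position lists to cut segments into an accumulator, reversed once at the end.
import Mathlib
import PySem

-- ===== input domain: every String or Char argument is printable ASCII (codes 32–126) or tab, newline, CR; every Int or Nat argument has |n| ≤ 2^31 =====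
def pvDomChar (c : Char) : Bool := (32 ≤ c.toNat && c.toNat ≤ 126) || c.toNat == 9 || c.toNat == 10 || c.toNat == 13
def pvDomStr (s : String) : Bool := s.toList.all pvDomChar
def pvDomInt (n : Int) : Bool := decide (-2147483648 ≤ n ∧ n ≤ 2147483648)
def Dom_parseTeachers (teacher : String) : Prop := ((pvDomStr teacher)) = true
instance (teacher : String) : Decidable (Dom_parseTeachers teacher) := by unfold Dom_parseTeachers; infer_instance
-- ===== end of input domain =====

-- B precomputes all occurrence positions of each title in one scan, then walks a pointer
-- through those position lists left-to-right instead of A's suffix-first recursion with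
-- repeated find calls (alternative decomposition).

-- Termination helper (cited by port A's decreasing_by): a successful find with a positive
-- start index lies between 1 and the string length (exclusive).
theorem pvFindFrom_bounds (s sub : String) (k : Nat) (hk : 1 ≤ k)
    (hsub : sub.toList ≠ []) (h : PySem.Str.findFrom s sub (k : Int) none ≠ -1) :
    1 ≤ (PySem.Str.findFrom s sub (k : Int) none).toNat ∧
      (PySem.Str.findFrom s sub (k : Int) none).toNat < s.toList.length := by
  rw [PySem.Str.findFrom_eq] at h ⊢
  by_cases hlen : k ≤ s.toList.length
  · obtain ⟨h1, h2, -⟩ := PySem.Chars.findFrom_natCast_spec s.toList sub.toList k hlen h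
    have hk' : (1 : Int) ≤ PySem.Chars.findFrom s.toList sub.toList (k : Int) none := by
      calc (1 : Int) ≤ (k : Int) := by exact_mod_cast hk
        _ ≤ _ := h1
    constructor
    · omega
    · have hne : ¬ s.toList.length ≤ (PySem.Chars.findFrom s.toList sub.toList (k : Int) none).toNat := by
        intro hle
        rw [List.drop_eq_nil_iff.mpr hle] at h2
        exact hsub (List.prefix_nil.mp h2)
      omega
  · exfalso
    apply h
    simp only [PySem.Chars.findFrom]
    have hlt : ((s.toList.length : Int) < (k : Int)) := by exact_mod_cast Nat.lt_of_not_le hlen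
    have hst : ¬ ((k : Int) < 0) := by omega
    rw [if_neg hst, if_pos hlt]

-- ===== PORT A =====
def parseTeachers (teacher : String) : List String :=
  if h0 : teacher = "" then []
  else
    let prof := PySem.Str.findFrom teacher "prof. " 1
    let dr := PySem.Str.findFrom teacher "dr " 7
    let mgr := PySem.Str.findFrom teacher "mgr " 1
    if hp : prof ≠ -1 then
      parseTeachers (PySem.Str.slice teacher (some prof) none) ++
        [PySem.Str.slice teacher none (some prof)]
    else if hd : dr ≠ -1 then
      parseTeachers (PySem.Str.slice teacher (some dr) none) ++
        [PySem.Str.slice teacher none (some dr)]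
    else if hm : mgr ≠ -1 then
      parseTeachers (PySem.Str.slice teacher (some mgr) none) ++
        [PySem.Str.slice teacher none (some mgr)]
    else [teacher]
termination_by teacher.toList.length
decreasing_by
  · have hb := pvFindFrom_bounds teacher "prof. " 1 (by omega) (by decide) (by exact_mod_cast hp)
    push_cast at hb
    have h1 : (0:Int) ≤ PySem.Str.findFrom teacher "prof. " 1 none := by omega
    simp only [PySem.Str.toList_slice, PySem.Chars.slice_eq_listSlice,
      PySem.List.slice_from _ h1, List.length_drop]
    omega
  · have hb := pvFindFrom_bounds teacher "dr " 7 (by omega) (by decide) (by exact_mod_cast hd)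
    push_cast at hb
    have h1 : (0:Int) ≤ PySem.Str.findFrom teacher "dr " 7 none := by omega
    simp only [PySem.Str.toList_slice, PySem.Chars.slice_eq_listSlice,
      PySem.List.slice_from _ h1, List.length_drop]
    omega
  · have hb := pvFindFrom_bounds teacher "mgr " 1 (by omega) (by decide) (by exact_mod_cast hm)
    push_cast at hb
    have h1 : (0:Int) ≤ PySem.Str.findFrom teacher "mgr " 1 none := by omega
    simp only [PySem.Str.toList_slice, PySem.Chars.slice_eq_listSlice,
      PySem.List.slice_from _ h1, List.length_drop]
    omega

-- ===== PORT B =====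
-- [i for i in range(n) if teacher.startswith(pat, i)]: startswith(pat, i) is exactly
-- pat.isPrefixOf (toList.drop i) for the nonempty ASCII titles used here and i < n.
def pvPositions (L : List Char) (pat : List Char) : List Nat :=
  (List.range L.length).filter (fun i => pat.isPrefixOf (L.drop i))

-- nxt(lst, lo): first element of lst that is ≥ lo, else None
def pvNxt (lst : List Nat) (lo : Nat) : Option Nat :=
  lst.find? (fun i => lo ≤ i)

-- the while loop of Source B; the fuel only makes the recursion total (the pointer p strictly
-- increases and stays below the length on the position lists, so fuel n+1 never runs out)
def pvBLoop (teacher : String) (profs drs mgrs : List Nat) :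
    Nat → Nat → List String → List String
  | 0, _, segments => segments
  | fuel+1, p, segments =>
    -- s = nxt(profs, p+1); if None: s = nxt(drs, p+7); if None: s = nxt(mgrs, p+1)
    match pvNxt profs (p+1) with
    | some s => pvBLoop teacher profs drs mgrs fuel s
        (segments ++ [PySem.Str.slice teacher (some (p : Int)) (some (s : Int))])
    | none =>
      match pvNxt drs (p+7) with
      | some s => pvBLoop teacher profs drs mgrs fuel s
          (segments ++ [PySem.Str.slice teacher (some (p : Int)) (some (s : Int))])
      | none =>
        match pvNxt mgrs (p+1) with
        | some s => pvBLoop teacher profs drs mgrs fuel s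
            (segments ++ [PySem.Str.slice teacher (some (p : Int)) (some (s : Int))])
        | none => segments ++ [PySem.Str.slice teacher (some (p : Int)) none]

def parseTeachers_alt (teacher : String) : List String :=
  if teacher = "" then []
  else
    (pvBLoop teacher (pvPositions teacher.toList "prof. ".toList)
      (pvPositions teacher.toList "dr ".toList)
      (pvPositions teacher.toList "mgr ".toList)
      (teacher.toList.length + 1) 0 []).reverse

-- ===== PRECONDITION & SPEC =====
def Spec_parseTeachers (teacher : String) (out : List String) : Prop := out = parseTeachers_alt teacher
instance (teacher : String) (out : List String) : Decidable (Spec_parseTeachers teacher out) := by unfold Spec_parseTeachers; infer_instance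

-- ===== CLAIM =====
def Claim_equal_parseTeachers : Prop := ∀ (teacher : String), Dom_parseTeachers teacher → Spec_parseTeachers teacher (parseTeachers teacher)

-- ===== LEMMAS AND PROOFS =====
theorem pvMem_positions (L pat : List Char) (s : Nat) :
    s ∈ pvPositions L pat ↔ s < L.length ∧ pat <+: L.drop s := by
  simp [pvPositions, List.mem_filter, List.mem_range, List.isPrefixOf_iff_prefix]

theorem pvPositions_sorted (L pat : List Char) :
    (pvPositions L pat).Pairwise (· < ·) :=
  List.Pairwise.sublist List.filter_sublist List.pairwise_lt_range

theorem pvNxt_eq_some (lst : List Nat) (lo s : Nat) (hsort : lst.Pairwise (· < ·))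
    (hmem : s ∈ lst) (hlo : lo ≤ s) (hmin : ∀ t ∈ lst, lo ≤ t → s ≤ t) :
    pvNxt lst lo = some s := by
  induction lst with
  | nil => cases hmem
  | cons h tl ih =>
    by_cases hh : lo ≤ h
    · have hsh : s ≤ h := hmin h (List.mem_cons_self) hh
      have hhs : h = s := by
        rcases List.mem_cons.mp hmem with rfl | hmem'
        · rfl
        · exact absurd (List.rel_of_pairwise_cons hsort hmem') (by omega)
      subst hhs
      simp [pvNxt, hh]
    · have hmem' : s ∈ tl := by
        rcases List.mem_cons.mp hmem with rfl | h'
        · exact absurd hlo hh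
        · exact h'
      have := ih (List.Pairwise.of_cons hsort) hmem'
        (fun t ht hlot => hmin t (List.mem_cons_of_mem _ ht) hlot)
      simpa [pvNxt, List.find?_cons, hh] using this
theorem pvNxt_eq_none (lst : List Nat) (lo : Nat)
    (h : ∀ t ∈ lst, ¬ lo ≤ t) : pvNxt lst lo = none := by
  simp only [pvNxt, List.find?_eq_none]
  intro t ht
  simpa using h t ht

theorem pvNxt_some_facts (lst : List Nat) (lo s : Nat) (h : pvNxt lst lo = some s) :
    s ∈ lst ∧ lo ≤ s :=
  ⟨List.mem_of_find?_eq_some h, by simpa using List.find?_some h⟩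

-- correspondence: find on the current suffix at start k = first precomputed position ≥ p+k
theorem pvFind_corr (L pat : List Char) (p k : Nat) (hpat : pat ≠ []) :
    PySem.Chars.findFrom (L.drop p) pat ((k : Nat) : Int) none =
      (match pvNxt (pvPositions L pat) (p + k) with
        | some s => (((s - p : Nat) : Int))
        | none => -1) := by
  by_cases hk : k ≤ (L.drop p).length
  · by_cases hfind : PySem.Chars.findFrom (L.drop p) pat ((k : Nat) : Int) none = -1
    · -- no occurrence at local index ≥ k
      have hno := (PySem.Chars.findFrom_natCast_eq_neg_one_iff (L.drop p) pat k hk).mp hfind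
      rw [List.drop_drop] at hno
      have : pvNxt (pvPositions L pat) (p + k) = none := by
        apply pvNxt_eq_none
        intro t ht hle
        rcases (pvMem_positions L pat t).mp ht with ⟨-, hpre⟩
        apply hno
        have hdt : L.drop t = (L.drop (p + k)).drop (t - (p + k)) := by
          rw [List.drop_drop]; congr 1; omega
        rw [hdt] at hpre
        exact hpre.isInfix.trans (List.IsSuffix.isInfix (List.drop_suffix _ _))
      rw [this, hfind]
    · obtain ⟨h1, h2, h3⟩ := PySem.Chars.findFrom_natCast_spec (L.drop p) pat k hk hfind
      set f := PySem.Chars.findFrom (L.drop p) pat ((k : Nat) : Int) none with hf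
      have hf0 : (0:Int) ≤ f := le_trans (by exact_mod_cast Nat.zero_le k) h1
      have hki : k ≤ f.toNat := by omega
      rw [List.drop_drop] at h2
      have h2' : pat <+: L.drop (p + f.toNat) := h2
      have hlen : p + f.toNat < L.length := by
        have hne : L.drop (p + f.toNat) ≠ [] := by
          intro hnil
          rw [hnil] at h2'
          exact hpat (List.prefix_nil.mp h2')
        have := List.length_pos_of_ne_nil hne
        simp only [List.length_drop] at this
        omega
      have hmem : p + f.toNat ∈ pvPositions L pat := by
        rw [pvMem_positions]
        exact ⟨hlen, h2'⟩
      have hnxt : pvNxt (pvPositions L pat) (p + k) = some (p + f.toNat) := by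
        apply pvNxt_eq_some _ _ _ (pvPositions_sorted L pat) hmem (by omega)
        intro t ht hlot
        rcases (pvMem_positions L pat t).mp ht with ⟨-, hpre⟩
        by_contra hlt
        push_neg at hlt
        have hkp : k ≤ t - p := by omega
        have hip : t - p < f.toNat := by omega
        apply h3 (t - p) hkp hip
        have hdt : List.drop (t - p) (List.drop p L) = List.drop t L := by
          rw [List.drop_drop]; congr 1; omega
        rw [hdt]
        exact hpre
      rw [hnxt]
      show f = ((p + f.toNat - p : Nat) : Int)
      have : p + f.toNat - p = f.toNat := by omega
      rw [this]
      omega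
  · -- start past the end of the suffix: find is -1 and no position can be ≥ p+k
    have hfind : PySem.Chars.findFrom (L.drop p) pat ((k : Nat) : Int) none = -1 := by
      simp only [PySem.Chars.findFrom]
      have hlt : (((L.drop p).length : Int) < (k : Int)) := by exact_mod_cast Nat.lt_of_not_le hk
      have hst : ¬ ((k : Int) < 0) := by omega
      rw [if_neg hst, if_pos hlt]
    have : pvNxt (pvPositions L pat) (p + k) = none := by
      apply pvNxt_eq_none
      intro t ht hle
      rcases (pvMem_positions L pat t).mp ht with ⟨htl, -⟩
      simp only [List.length_drop] at hk
      omega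
    rw [this, hfind]

-- two strings with the same character list are equal
theorem pvStr_ext (s t : String) (h : s.toList = t.toList) : s = t := by
  have := congrArg String.ofList h
  simpa using this

theorem pvNatCast_ne_neg_one (n : Nat) : ((n : Int)) ≠ -1 := by omega

-- loop invariant: from pointer p the loop appends A's segments for teacher[p:] in reverse
set_option maxHeartbeats 1000000 in
theorem pvBLoop_eq (teacher : String) :
    ∀ (fuel p : Nat) (segments : List String),
      p < teacher.toList.length → teacher.toList.length ≤ fuel + p →
      pvBLoop teacher (pvPositions teacher.toList "prof. ".toList)
          (pvPositions teacher.toList "dr ".toList)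
          (pvPositions teacher.toList "mgr ".toList) fuel p segments =
        segments ++ (parseTeachers (PySem.Str.slice teacher (some (p : Int)) none)).reverse := by
  intro fuel
  induction fuel with
  | zero => intro p segments hp hfuel; omega
  | succ fuel ih =>
    intro p segments hp hfuel
    have hTl : (PySem.Str.slice teacher (some (p : Int)) none).toList = teacher.toList.drop p := by
      rw [PySem.Str.toList_slice, PySem.Chars.slice_eq_listSlice, PySem.List.slice_from_natCast]
    have hTne : PySem.Str.slice teacher (some (p : Int)) none ≠ "" := by
      intro hc
      have := congrArg String.toList hc
      rw [hTl] at this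
      have := congrArg List.length this
      simp only [List.length_drop, String.toList_empty, List.length_nil] at this
      omega
    have hcp : PySem.Str.findFrom (PySem.Str.slice teacher (some (p : Int)) none) "prof. " 1 =
        (match pvNxt (pvPositions teacher.toList "prof. ".toList) (p + 1) with
          | some s => (((s - p : Nat) : Int)) | none => -1) := by
      rw [PySem.Str.findFrom_eq, hTl]
      have := pvFind_corr teacher.toList "prof. ".toList p 1 (by decide)
      simpa using this
    have hcd : PySem.Str.findFrom (PySem.Str.slice teacher (some (p : Int)) none) "dr " 7 =
        (match pvNxt (pvPositions teacher.toList "dr ".toList) (p + 7) with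
          | some s => (((s - p : Nat) : Int)) | none => -1) := by
      rw [PySem.Str.findFrom_eq, hTl]
      have := pvFind_corr teacher.toList "dr ".toList p 7 (by decide)
      simpa using this
    have hcm : PySem.Str.findFrom (PySem.Str.slice teacher (some (p : Int)) none) "mgr " 1 =
        (match pvNxt (pvPositions teacher.toList "mgr ".toList) (p + 1) with
          | some s => (((s - p : Nat) : Int)) | none => -1) := by
      rw [PySem.Str.findFrom_eq, hTl]
      have := pvFind_corr teacher.toList "mgr ".toList p 1 (by decide)
      simpa using this
    rw [pvBLoop]
    rcases hprof : pvNxt (pvPositions teacher.toList "prof. ".toList) (p + 1) with _ | s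
    · simp only [hprof] at hcp
      rcases hdr : pvNxt (pvPositions teacher.toList "dr ".toList) (p + 7) with _ | s
      · simp only [hdr] at hcd
        rcases hmgr : pvNxt (pvPositions teacher.toList "mgr ".toList) (p + 1) with _ | s
        · -- no split anywhere: A returns [teacher[p:]]
          simp only [hmgr] at hcm
          rw [parseTeachers, dif_neg hTne]
          simp only [hcp, hcd, hcm]
          rw [dif_neg (by simp), dif_neg (by simp), dif_neg (by simp)]
          simp
        · -- mgr split
          simp only [hmgr] at hcm
          obtain ⟨hsmem, hsle⟩ := pvNxt_some_facts _ _ _ hmgr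
          obtain ⟨hslt, -⟩ := (pvMem_positions teacher.toList _ s).mp hsmem
          have hfs : teacher.toList.length ≤ fuel + s := by omega
          have hstep := ih s (segments ++ [PySem.Str.slice teacher (some (p : Int)) (some (s : Int))])
            hslt hfs
          rw [parseTeachers, dif_neg hTne]
          simp only [hcp, hcd, hcm]
          rw [dif_neg (by simp), dif_neg (by simp), dif_pos (pvNatCast_ne_neg_one _)]
          have e1 : PySem.Str.slice (PySem.Str.slice teacher (some (p : Int)) none)
              (some ((s - p : Nat) : Int)) none = PySem.Str.slice teacher (some (s : Int)) none := by
            apply pvStr_ext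
            simp only [PySem.Str.toList_slice, PySem.Chars.slice_eq_listSlice,
              PySem.List.slice_from_natCast, List.drop_drop]
            rw [Nat.add_sub_cancel' (le_trans (Nat.le_add_right _ _) hsle)]
          have e2 : PySem.Str.slice (PySem.Str.slice teacher (some (p : Int)) none)
              none (some ((s - p : Nat) : Int)) =
              PySem.Str.slice teacher (some (p : Int)) (some (s : Int)) := by
            apply pvStr_ext
            simp only [PySem.Str.toList_slice, PySem.Chars.slice_eq_listSlice,
              PySem.List.slice_from_natCast, PySem.List.slice_to_natCast,
              PySem.List.slice_natCast]
          rw [hstep, e1, e2]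
          simp
      · -- dr split
        simp only [hdr] at hcd
        obtain ⟨hsmem, hsle⟩ := pvNxt_some_facts _ _ _ hdr
        obtain ⟨hslt, -⟩ := (pvMem_positions teacher.toList _ s).mp hsmem
        have hfs : teacher.toList.length ≤ fuel + s := by omega
        have hstep := ih s (segments ++ [PySem.Str.slice teacher (some (p : Int)) (some (s : Int))])
          hslt hfs
        rw [parseTeachers, dif_neg hTne]
        simp only [hcp, hcd]
        rw [dif_neg (by simp), dif_pos (pvNatCast_ne_neg_one _)]
        have e1 : PySem.Str.slice (PySem.Str.slice teacher (some (p : Int)) none)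
            (some ((s - p : Nat) : Int)) none = PySem.Str.slice teacher (some (s : Int)) none := by
          apply pvStr_ext
          simp only [PySem.Str.toList_slice, PySem.Chars.slice_eq_listSlice,
            PySem.List.slice_from_natCast, List.drop_drop]
          rw [Nat.add_sub_cancel' (le_trans (Nat.le_add_right _ _) hsle)]
        have e2 : PySem.Str.slice (PySem.Str.slice teacher (some (p : Int)) none)
            none (some ((s - p : Nat) : Int)) =
            PySem.Str.slice teacher (some (p : Int)) (some (s : Int)) := by
          apply pvStr_ext
          simp only [PySem.Str.toList_slice, PySem.Chars.slice_eq_listSlice,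
            PySem.List.slice_from_natCast, PySem.List.slice_to_natCast,
            PySem.List.slice_natCast]
        rw [hstep, e1, e2]
        simp
    · -- prof split
      simp only [hprof] at hcp
      obtain ⟨hsmem, hsle⟩ := pvNxt_some_facts _ _ _ hprof
      obtain ⟨hslt, -⟩ := (pvMem_positions teacher.toList _ s).mp hsmem
      have hfs : teacher.toList.length ≤ fuel + s := by omega
      have hstep := ih s (segments ++ [PySem.Str.slice teacher (some (p : Int)) (some (s : Int))])
        hslt hfs
      rw [parseTeachers, dif_neg hTne]
      simp only [hcp]
      rw [dif_pos (pvNatCast_ne_neg_one _)]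
      have e1 : PySem.Str.slice (PySem.Str.slice teacher (some (p : Int)) none)
          (some ((s - p : Nat) : Int)) none = PySem.Str.slice teacher (some (s : Int)) none := by
        apply pvStr_ext
        simp only [PySem.Str.toList_slice, PySem.Chars.slice_eq_listSlice,
          PySem.List.slice_from_natCast, List.drop_drop]
        rw [Nat.add_sub_cancel' (le_trans (Nat.le_add_right _ _) hsle)]
      have e2 : PySem.Str.slice (PySem.Str.slice teacher (some (p : Int)) none)
          none (some ((s - p : Nat) : Int)) =
          PySem.Str.slice teacher (some (p : Int)) (some (s : Int)) := by
        apply pvStr_ext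
        simp only [PySem.Str.toList_slice, PySem.Chars.slice_eq_listSlice,
          PySem.List.slice_from_natCast, PySem.List.slice_to_natCast,
          PySem.List.slice_natCast]
      rw [hstep, e1, e2]
      simp

-- ===== VERDICT =====
theorem parseTeachers_spec : Claim_equal_parseTeachers := by
  intro teacher _
  unfold Spec_parseTeachers parseTeachers_alt
  by_cases h0 : teacher = ""
  · rw [if_pos h0, h0, parseTeachers, dif_pos rfl]
  · rw [if_neg h0]
    have hlen : 0 < teacher.toList.length := by
      rcases Nat.eq_zero_or_pos teacher.toList.length with h | h
      · exact absurd (pvStr_ext teacher "" (by simpa using List.eq_nil_of_length_eq_zero h)) h0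
      · exact h
    rw [pvBLoop_eq teacher (teacher.toList.length + 1) 0 [] hlen (by omega)]
    have : PySem.Str.slice teacher (some ((0 : Nat) : Int)) none = teacher := by
      apply pvStr_ext
      simp only [PySem.Str.toList_slice, PySem.Chars.slice_eq_listSlice,
        PySem.List.slice_from_natCast, List.drop_zero]
    rw [this]
    simp
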